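-- pv_equiv track=rewrite | github.com/rohantilva/Google-Like-Question-Answering-System | HPC_KDFT_hw1/integration_tests/test_index.py | make_stop_word_text
-- ===== SOURCE A (Python) =====
-- def make_stop_word_text(num_words=250):
--     text = ''
--     for word_num in range(num_words):
--         text += ' s{}'.format(word_num)
--         if (word_num + 1) % 10 == 0:
--             text += '\n'
--         if (word_num + 1) % 50 == 0:
--             text += '\n'
--
--     return text
-- ===== SOURCE B (Python) =====
-- def make_stop_word_text(num_words=250):
--     parts = []
--     for start in range(0, num_words, 10):
--         end = min(start + 10, num_words)
--         parts.append(''.join(' s{}'.format(j) for j in range(start, end)))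
--         if end == start + 10:
--             parts.append('\n')
--             if end % 50 == 0:
--                 parts.append('\n')
--     return ''.join(parts)
-- ===== Notes on version B (the rewrite author's own statement) =====
-- stated objective: alternative
-- what changed: Instead of appending one word at a time with per-word modulo tests, B iterates over whole ten-word chunks via a strided range, builds each line with a join, and emits line/newline pieces into a list joined once at the end.
import Mathlib
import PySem

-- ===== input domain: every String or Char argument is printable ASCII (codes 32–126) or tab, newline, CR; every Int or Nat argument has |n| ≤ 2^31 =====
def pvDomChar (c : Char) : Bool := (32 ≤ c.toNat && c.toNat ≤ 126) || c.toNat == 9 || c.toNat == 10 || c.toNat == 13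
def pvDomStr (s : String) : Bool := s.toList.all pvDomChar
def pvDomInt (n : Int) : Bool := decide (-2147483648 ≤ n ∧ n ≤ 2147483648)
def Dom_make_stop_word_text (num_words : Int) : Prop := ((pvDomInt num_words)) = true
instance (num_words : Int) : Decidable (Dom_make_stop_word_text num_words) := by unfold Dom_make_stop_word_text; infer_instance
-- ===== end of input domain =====

-- B builds the text by 10-word chunks (lines) joined once, instead of A's per-word appends; equivalence proved for all inputs.

-- ===== PORT A =====
def pvStepA (text : String) (word_num : Int) : String :=
  let text := text ++ (" s" ++ PySem.Int.toStr word_num)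
  let text := if PySem.Int.mod (word_num + 1) 10 = 0 then text ++ "\n" else text
  if PySem.Int.mod (word_num + 1) 50 = 0 then text ++ "\n" else text

def make_stop_word_text (num_words : Int) : String :=
  (PySem.List.pyRange 0 num_words 1).foldl pvStepA ""

-- ===== PORT B =====
def pvChunkLine (start stop : Int) : String :=
  PySem.Str.join "" ((PySem.List.pyRange start stop 1).map (fun j => " s" ++ PySem.Int.toStr j))

def pvStepB (num_words : Int) (parts : List String) (start : Int) : List String :=
  let e := min (start + 10) num_words
  let parts := parts ++ [pvChunkLine start e]
  if e = start + 10 then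
    let parts := parts ++ ["\n"]
    if PySem.Int.mod e 50 = 0 then parts ++ ["\n"] else parts
  else parts

def make_stop_word_text_alt (num_words : Int) : String :=
  PySem.Str.join "" ((PySem.List.pyRange 0 num_words 10).foldl (pvStepB num_words) [])

-- ===== PRECONDITION & SPEC =====
def Spec_make_stop_word_text (num_words : Int) (out : String) : Prop := out = make_stop_word_text_alt num_words
instance (num_words : Int) (out : String) : Decidable (Spec_make_stop_word_text num_words out) := by unfold Spec_make_stop_word_text; infer_instance

-- ===== CLAIM (what is proved, stated in full; the proofs are below) =====
def Claim_equal_make_stop_word_text : Prop := ∀ (num_words : Int), Dom_make_stop_word_text num_words → Spec_make_stop_word_text num_words (make_stop_word_text num_words)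

-- ===== LEMMAS AND PROOFS =====

-- concatenation of a list of strings
def pvConc (l : List String) : String := l.foldl (· ++ ·) ""

-- what A appends for one word
def pvGA (w : Int) : String :=
  (" s" ++ PySem.Int.toStr w) ++
    ((if PySem.Int.mod (w + 1) 10 = 0 then "\n" else "") ++
     (if PySem.Int.mod (w + 1) 50 = 0 then "\n" else ""))

-- the bare token of one word
def pvH (j : Int) : String := " s" ++ PySem.Int.toStr j

theorem pvConc_foldl (l : List String) (acc : String) :
    l.foldl (· ++ ·) acc = acc ++ pvConc l := by
  induction l generalizing acc with
  | nil => simp [pvConc]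
  | cons x t ih =>
    simp only [List.foldl_cons, pvConc]
    rw [ih (acc ++ x), ih ("" ++ x)]
    simp [String.append_assoc]

theorem pvConc_cons (x : String) (t : List String) : pvConc (x :: t) = x ++ pvConc t := by
  rw [show pvConc (x :: t) = t.foldl (· ++ ·) ("" ++ x) from rfl, pvConc_foldl]
  simp

theorem pvConc_append (l1 l2 : List String) : pvConc (l1 ++ l2) = pvConc l1 ++ pvConc l2 := by
  simp only [pvConc, List.foldl_append]
  rw [pvConc_foldl l2 (List.foldl (· ++ ·) "" l1)]
  rfl

theorem pvConc_singleton (x : String) : pvConc [x] = x := by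
  rw [pvConc_cons]; simp [pvConc]

theorem pvFlattenIntersperseNil (p : List (List Char)) :
    (List.intersperse ([] : List Char) p).flatten = p.flatten := by
  induction p with
  | nil => simp
  | cons a t ih => cases t <;> simp_all [List.intersperse]

theorem pvConc_toList (l : List String) :
    (pvConc l).toList = (l.map String.toList).flatten := by
  induction l with
  | nil => simp [pvConc]
  | cons x t ih => rw [pvConc_cons]; simp_all

theorem pvJoinEmpty (l : List String) : PySem.Str.join "" l = pvConc l := by
  apply String.toList_inj.mp
  simp only [PySem.Str.join, PySem.Chars.join, List.intercalate, String.toList_ofList]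
  rw [pvConc_toList]
  simpa using pvFlattenIntersperseNil (l.map String.toList)

theorem pvStepA_eq (acc : String) (w : Int) : pvStepA acc w = acc ++ pvGA w := by
  unfold pvStepA pvGA
  split_ifs <;> simp [String.append_assoc]

theorem pvFoldlA (l : List Int) (acc : String) :
    l.foldl pvStepA acc = acc ++ pvConc (l.map pvGA) := by
  induction l generalizing acc with
  | nil => simp [pvConc]
  | cons x t ih =>
    simp only [List.foldl_cons, List.map_cons]
    rw [pvStepA_eq, ih, pvConc_cons, String.append_assoc]

theorem pvStepB_shift (n : Int) (parts : List String) (s : Int) :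
    pvStepB n parts s = parts ++ pvStepB n [] s := by
  simp only [pvStepB]
  split_ifs <;> simp

theorem pvFoldlB (n : Int) (l : List Int) (parts : List String) :
    l.foldl (pvStepB n) parts = parts ++ (l.map (pvStepB n [])).flatten := by
  induction l generalizing parts with
  | nil => simp
  | cons x t ih =>
    simp only [List.foldl_cons, List.map_cons, List.flatten_cons]
    rw [pvStepB_shift, ih, List.append_assoc]

theorem pvChunkLine_conc (a b : Int) :
    pvChunkLine a b = pvConc ((PySem.List.pyRange a b 1).map pvH) := by
  rw [pvChunkLine, pvJoinEmpty]
  rfl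

theorem pvRangeTenNil (a b : Int) (h : b ≤ a) : PySem.List.pyRange a b 10 = [] := by
  rw [PySem.List.pyRange_of_pos a b (by norm_num)]
  simp [if_neg (not_lt.mpr h)]

theorem pvRangeTenCons (a b : Int) (h : a < b) :
    PySem.List.pyRange a b 10 = a :: PySem.List.pyRange (a + 10) b 10 := by
  rw [PySem.List.pyRange_of_pos a b (by norm_num),
      PySem.List.pyRange_of_pos (a + 10) b (by norm_num), if_pos h]
  by_cases h2 : a + 10 < b
  · rw [if_pos h2]
    have hm : ((b - a + 10 - 1) / 10).toNat = ((b - (a + 10) + 10 - 1) / 10).toNat + 1 := by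
      omega
    rw [hm, List.range_succ_eq_map]
    simp only [List.map_cons, List.map_map, Nat.cast_zero, mul_zero, add_zero, List.cons.injEq,
      true_and]
    apply List.map_congr_left
    intro k _
    simp only [Function.comp]
    push_cast
    ring
  · rw [if_neg h2]
    have hm : ((b - a + 10 - 1) / 10).toNat = 1 := by omega
    rw [hm]
    simp

-- one complete or final partial chunk of A's output equals one step of B
theorem pvChunk_eq (n s : Int) (hs : (10 : Int) ∣ s) (hlt : s < n) :
    pvConc ((PySem.List.pyRange s (min (s + 10) n) 1).map pvGA) = pvConc (pvStepB n [] s) := by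
  by_cases hfull : s + 10 ≤ n
  · have he : min (s + 10) n = s + 10 := min_eq_left hfull
    have hsplit : PySem.List.pyRange s (s + 10) 1
        = PySem.List.pyRange s (s + 9) 1 ++ PySem.List.pyRange (s + 9) (s + 10) 1 :=
      PySem.List.pyRange_one_append s (s + 9) (s + 10) (by omega) (by omega)
    have hsing : PySem.List.pyRange (s + 9) (s + 10) 1 = [s + 9] := by
      have := PySem.List.pyRange_one_singleton (s + 9)
      rw [show s + 9 + 1 = s + 10 by ring] at this
      exact this
    have hbody : (PySem.List.pyRange s (s + 9) 1).map pvGA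
        = (PySem.List.pyRange s (s + 9) 1).map pvH := by
      apply List.map_congr_left
      intro j hj
      rw [PySem.List.mem_pyRange_one] at hj
      have h10 : ¬ (10 : Int) ∣ (j + 1) := by omega
      have h50 : ¬ (50 : Int) ∣ (j + 1) := by omega
      simp [pvGA, pvH, h10, h50]
    have hd10 : (10 : Int) ∣ (s + 9 + 1) := by omega
    simp only [pvStepB]
    rw [he, if_pos rfl, pvChunkLine_conc, hsplit, hsing]
    simp only [List.map_append, List.map_cons, List.map_nil, pvConc_append, hbody]
    by_cases h50 : (50 : Int) ∣ (s + 10)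
    · have h50' : (50 : Int) ∣ (s + 9 + 1) := by omega
      rw [if_pos (by rw [PySem.Int.mod_eq_zero_iff_dvd]; exact h50)]
      simp [pvGA, pvH, hd10, h50', pvConc,
        String.append_assoc]
    · have h50' : ¬ (50 : Int) ∣ (s + 9 + 1) := by omega
      rw [if_neg (by rw [PySem.Int.mod_eq_zero_iff_dvd]; exact h50)]
      simp [pvGA, pvH, hd10, h50', pvConc,
        String.append_assoc]
  · have he : min (s + 10) n = n := min_eq_right (by omega)
    have hbody : (PySem.List.pyRange s n 1).map pvGA = (PySem.List.pyRange s n 1).map pvH := by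
      apply List.map_congr_left
      intro j hj
      rw [PySem.List.mem_pyRange_one] at hj
      have h10 : ¬ (10 : Int) ∣ (j + 1) := by omega
      have h50 : ¬ (50 : Int) ∣ (j + 1) := by omega
      simp [pvGA, pvH, h10, h50]
    simp only [pvStepB]
    rw [he, if_neg (by omega), pvChunkLine_conc, hbody]
    simp [pvConc_singleton]

theorem pvMain (n : Int) :
    ∀ (k : Nat) (s : Int), (10 : Int) ∣ s → n ≤ s + 10 * k →
      pvConc ((PySem.List.pyRange s n 1).map pvGA)
        = pvConc (((PySem.List.pyRange s n 10).map (pvStepB n [])).flatten) := by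
  intro k
  induction k with
  | zero =>
    intro s _ hb
    rw [PySem.List.pyRange_one_eq_nil (by omega), pvRangeTenNil s n (by omega)]
    simp
  | succ k ih =>
    intro s hs hb
    by_cases hlt : s < n
    · rw [pvRangeTenCons s n hlt]
      have hsplit : PySem.List.pyRange s n 1
          = PySem.List.pyRange s (min (s + 10) n) 1 ++ PySem.List.pyRange (min (s + 10) n) n 1 :=
        PySem.List.pyRange_one_append s (min (s + 10) n) n (by omega) (by omega)
      have htail : PySem.List.pyRange (min (s + 10) n) n 1 = PySem.List.pyRange (s + 10) n 1 := by
        by_cases hfull : s + 10 ≤ n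
        · rw [min_eq_left hfull]
        · rw [min_eq_right (by omega), PySem.List.pyRange_one_eq_nil le_rfl,
            PySem.List.pyRange_one_eq_nil (by omega)]
      rw [hsplit, htail]
      simp only [List.map_append, pvConc_append, List.map_cons, List.flatten_cons]
      rw [pvChunk_eq n s hs hlt, ih (s + 10) (by omega) (by push_cast at hb ⊢; omega)]
    · rw [PySem.List.pyRange_one_eq_nil (by omega), pvRangeTenNil s n (by omega)]
      simp

-- ===== VERDICT (by name: the statement is the Claim_ definition above) =====
theorem make_stop_word_text_spec : Claim_equal_make_stop_word_text := by
  intro n _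
  unfold Spec_make_stop_word_text make_stop_word_text make_stop_word_text_alt
  rw [pvFoldlA, pvJoinEmpty, pvFoldlB]
  simp only [String.empty_append, List.nil_append]
  exact pvMain n n.toNat 0 ⟨0, by ring⟩ (by omega)
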